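-- pv_equiv track=rewrite | github.com/Ashiq-am/Data-Structures-Algorithm | 1.Python Algorithms/6.Geometric Algorithms/4.3D Objects/Maximize volume of cuboid with given sum of sides/Brute Force Python3 code to Maximize volume of cuboid with given sum of sides.py | maxvolume
-- ===== SOURCE A (Python) =====
-- def maxvolume(s):
--     maxvalue = 0
--
--     # for length
--     i = 1
--     for i in range(s - 1):
--         j = 1
--
--         # for breadth
--         for j in range(s):
--             # for height
--             k = s - i - j
--
--             # calculating maximum volume.
--             maxvalue = max(maxvalue, i * j * k)
--
--     return maxvalue
-- ===== SOURCE B (Python) =====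
-- def maxvolume(s):
--     # Closed form: the maximum of i*j*k over nonnegative integers summing to s
--     # is attained at the near-equal split (s//3, (s+1)//3, (s+2)//3).
--     if s < 3:
--         return 0
--     return (s // 3) * ((s + 1) // 3) * ((s + 2) // 3)
-- ===== Notes on version B (the rewrite author's own statement) =====
-- stated objective: faster
-- what changed: Replaced A's quadratic double loop over all (length, breadth) pairs by a constant-time closed form: the maximum product is attained at the near-equal three-way split of the side sum.
import Mathlib
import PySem

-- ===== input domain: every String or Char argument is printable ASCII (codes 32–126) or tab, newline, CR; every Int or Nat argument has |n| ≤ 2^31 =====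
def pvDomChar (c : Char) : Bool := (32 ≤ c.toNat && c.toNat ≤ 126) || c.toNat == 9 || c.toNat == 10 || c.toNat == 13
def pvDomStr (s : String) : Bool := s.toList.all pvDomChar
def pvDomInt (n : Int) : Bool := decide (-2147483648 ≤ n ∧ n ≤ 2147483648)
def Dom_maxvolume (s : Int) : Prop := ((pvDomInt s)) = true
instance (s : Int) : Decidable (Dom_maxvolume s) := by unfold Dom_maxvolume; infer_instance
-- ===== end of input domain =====

-- B replaces A's O(s^2) double loop by the O(1) closed form (near-equal three-way split).

-- ===== PORT A =====
def maxvolume (s : Int) : Int :=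
  (PySem.List.pyRange 0 (s - 1) 1).foldl (fun maxvalue i =>
    (PySem.List.pyRange 0 s 1).foldl (fun mv j =>
      max mv (i * j * (s - i - j))) maxvalue) 0

-- ===== PORT B =====
def maxvolume_alt (s : Int) : Int :=
  if s < 3 then 0
  else PySem.Int.floordiv s 3 * PySem.Int.floordiv (s + 1) 3 * PySem.Int.floordiv (s + 2) 3

-- ===== PRECONDITION & SPEC =====
def Spec_maxvolume (s : Int) (out : Int) : Prop := out = maxvolume_alt s
instance (s : Int) (out : Int) : Decidable (Spec_maxvolume s out) := by unfold Spec_maxvolume; infer_instance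

-- ===== CLAIM (what is proved, stated in full; the proofs are below) =====
def Claim_equal_maxvolume : Prop := ∀ (s : Int), Dom_maxvolume s → Spec_maxvolume s (maxvolume s)

-- ===== LEMMAS AND PROOFS =====

-- the closed-form optimum for s = 3*q + r, r ∈ {0,1,2}
def pvM (q r : Int) : Int := q * (q + (if 2 ≤ r then 1 else 0)) * (q + (if 1 ≤ r then 1 else 0))

-- generic foldl facts for an inflationary step
theorem pv_foldl_infl {β : Type} (h : Int → β → Int) (hi : ∀ m x, m ≤ h m x) (l : List β) :
    ∀ init : Int, init ≤ l.foldl h init := by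
  induction l with
  | nil => intro init; exact le_refl _
  | cons x xs ih => intro init; exact (hi init x).trans (ih (h init x))

theorem pv_foldl_le {β : Type} (h : Int → β → Int) (l : List β) (M : Int) :
    ∀ init : Int, init ≤ M → (∀ m x, x ∈ l → m ≤ M → h m x ≤ M) → l.foldl h init ≤ M := by
  induction l with
  | nil => intro init h0 _; exact h0
  | cons x xs ih =>
      intro init h0 hs
      exact ih (h init x) (hs init x (List.mem_cons_self) h0)
        (fun m y hy hm => hs m y (List.mem_cons_of_mem x hy) hm)

theorem pv_foldl_ge {β : Type} (h : Int → β → Int) (hi : ∀ m x, m ≤ h m x) (l : List β)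
    (i : β) (t : Int) (ht : ∀ m, t ≤ h m i) :
    i ∈ l → ∀ init : Int, t ≤ l.foldl h init := by
  induction l with
  | nil => intro hmem; exact absurd hmem (List.not_mem_nil)
  | cons x xs ih =>
      intro hmem init
      rcases List.mem_cons.mp hmem with heq | hmem'
      · subst heq; exact (ht init).trans (pv_foldl_infl h hi xs (h init i))
      · exact ih hmem' (h init x)

-- exchange argument: any nonneg integer triple summing to 3*q + r has product ≤ pvM q r
theorem pv_abc_le (q r : Int) (hq : 0 ≤ q) (hr : r = 0 ∨ r = 1 ∨ r = 2) :
    ∀ (n : Nat) (a b c : Int), 0 ≤ a → 0 ≤ b → 0 ≤ c → a + b + c = 3 * q + r →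
      ((a - b) ^ 2 + (b - c) ^ 2 + (a - c) ^ 2).toNat = n → a * b * c ≤ pvM q r := by
  intro n
  induction n using Nat.strong_induction_on with
  | _ n ih =>
    intro a b c ha hb hc hsum hmeas
    by_cases hclose : a - b ≤ 1 ∧ b - a ≤ 1 ∧ b - c ≤ 1 ∧ c - b ≤ 1 ∧ a - c ≤ 1 ∧ c - a ≤ 1
    · -- base: near-equal triple, product is exactly pvM q r (up to permutation)
      obtain ⟨h1, h2, h3, h4, h5, h6⟩ := hclose
      rcases hr with hr | hr | hr <;> subst hr <;> simp only [pvM] <;> norm_num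
      · have : a = q ∧ b = q ∧ c = q := by omega
        obtain ⟨rfl, rfl, rfl⟩ := this; ring_nf; exact le_refl _
      · have : (a = q + 1 ∧ b = q ∧ c = q) ∨ (a = q ∧ b = q + 1 ∧ c = q) ∨
            (a = q ∧ b = q ∧ c = q + 1) := by omega
        rcases this with ⟨rfl, rfl, rfl⟩ | ⟨rfl, rfl, rfl⟩ | ⟨rfl, rfl, rfl⟩ <;>
          (ring_nf; exact le_refl _)
      · have : (a = q ∧ b = q + 1 ∧ c = q + 1) ∨ (a = q + 1 ∧ b = q ∧ c = q + 1) ∨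
            (a = q + 1 ∧ b = q + 1 ∧ c = q) := by omega
        rcases this with ⟨rfl, rfl, rfl⟩ | ⟨rfl, rfl, rfl⟩ | ⟨rfl, rfl, rfl⟩ <;>
          (ring_nf; exact le_refl _)
    · -- step: some pair differs by ≥ 2; move one unit from the larger to the smaller
      push Not at hclose
      have hD0 : (0:Int) ≤ (a - b) ^ 2 + (b - c) ^ 2 + (a - c) ^ 2 := by positivity
      by_cases h1 : 2 ≤ a - b
      · -- a ≥ b + 2 : (a-1, b+1, c)
        have hdec : ((a-1) - (b+1)) ^ 2 + ((b+1) - c) ^ 2 + ((a-1) - c) ^ 2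
            < (a - b) ^ 2 + (b - c) ^ 2 + (a - c) ^ 2 := by nlinarith
        have hD0' : (0:Int) ≤ ((a-1) - (b+1)) ^ 2 + ((b+1) - c) ^ 2 + ((a-1) - c) ^ 2 := by positivity
        have hle : a * b * c ≤ (a-1) * (b+1) * c := by nlinarith [mul_nonneg hc (by omega : (0:Int) ≤ a - b - 1)]
        exact hle.trans (ih _ (by omega) (a-1) (b+1) c (by omega) (by omega) hc (by omega) rfl)
      · by_cases h2 : 2 ≤ b - a
        · -- b ≥ a + 2 : (a+1, b-1, c)
          have hdec : ((a+1) - (b-1)) ^ 2 + ((b-1) - c) ^ 2 + ((a+1) - c) ^ 2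
              < (a - b) ^ 2 + (b - c) ^ 2 + (a - c) ^ 2 := by nlinarith
          have hD0' : (0:Int) ≤ ((a+1) - (b-1)) ^ 2 + ((b-1) - c) ^ 2 + ((a+1) - c) ^ 2 := by positivity
          have hle : a * b * c ≤ (a+1) * (b-1) * c := by nlinarith [mul_nonneg hc (by omega : (0:Int) ≤ b - a - 1)]
          exact hle.trans (ih _ (by omega) (a+1) (b-1) c (by omega) (by omega) hc (by omega) rfl)
        · by_cases h3 : 2 ≤ b - c
          · -- b ≥ c + 2 : (a, b-1, c+1)
            have hdec : (a - (b-1)) ^ 2 + ((b-1) - (c+1)) ^ 2 + (a - (c+1)) ^ 2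
                < (a - b) ^ 2 + (b - c) ^ 2 + (a - c) ^ 2 := by nlinarith
            have hD0' : (0:Int) ≤ (a - (b-1)) ^ 2 + ((b-1) - (c+1)) ^ 2 + (a - (c+1)) ^ 2 := by positivity
            have hle : a * b * c ≤ a * (b-1) * (c+1) := by nlinarith [mul_nonneg ha (by omega : (0:Int) ≤ b - c - 1)]
            exact hle.trans (ih _ (by omega) a (b-1) (c+1) ha (by omega) (by omega) (by omega) rfl)
          · by_cases h4 : 2 ≤ c - b
            · -- c ≥ b + 2 : (a, b+1, c-1)
              have hdec : (a - (b+1)) ^ 2 + ((b+1) - (c-1)) ^ 2 + (a - (c-1)) ^ 2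
                  < (a - b) ^ 2 + (b - c) ^ 2 + (a - c) ^ 2 := by nlinarith
              have hD0' : (0:Int) ≤ (a - (b+1)) ^ 2 + ((b+1) - (c-1)) ^ 2 + (a - (c-1)) ^ 2 := by positivity
              have hle : a * b * c ≤ a * (b+1) * (c-1) := by nlinarith [mul_nonneg ha (by omega : (0:Int) ≤ c - b - 1)]
              exact hle.trans (ih _ (by omega) a (b+1) (c-1) ha (by omega) (by omega) (by omega) rfl)
            · by_cases h5 : 2 ≤ a - c
              · -- a ≥ c + 2 : (a-1, b, c+1)
                have hdec : ((a-1) - b) ^ 2 + (b - (c+1)) ^ 2 + ((a-1) - (c+1)) ^ 2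
                    < (a - b) ^ 2 + (b - c) ^ 2 + (a - c) ^ 2 := by nlinarith
                have hD0' : (0:Int) ≤ ((a-1) - b) ^ 2 + (b - (c+1)) ^ 2 + ((a-1) - (c+1)) ^ 2 := by positivity
                have hle : a * b * c ≤ (a-1) * b * (c+1) := by nlinarith [mul_nonneg hb (by omega : (0:Int) ≤ a - c - 1)]
                exact hle.trans (ih _ (by omega) (a-1) b (c+1) (by omega) hb (by omega) (by omega) rfl)
              · -- c ≥ a + 2 : (a+1, b, c-1)
                have h6 : 2 ≤ c - a := by omega
                have hdec : ((a+1) - b) ^ 2 + (b - (c-1)) ^ 2 + ((a+1) - (c-1)) ^ 2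
                    < (a - b) ^ 2 + (b - c) ^ 2 + (a - c) ^ 2 := by nlinarith
                have hD0' : (0:Int) ≤ ((a+1) - b) ^ 2 + (b - (c-1)) ^ 2 + ((a+1) - (c-1)) ^ 2 := by positivity
                have hle : a * b * c ≤ (a+1) * b * (c-1) := by nlinarith [mul_nonneg hb (by omega : (0:Int) ≤ c - a - 1)]
                exact hle.trans (ih _ (by omega) (a+1) b (c-1) (by omega) hb (by omega) (by omega) rfl)


-- the double loop computes exactly the closed-form optimum q*(q+u)*(q+v)
theorem pv_loop_eq (s q u v : Int) (hq : 1 ≤ q) (hs : s = q + (q + u) + (q + v))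
    (hu : 0 ≤ u) (_hv : v ≤ 1) (huv : u ≤ v)
    (hbound : ∀ a b c : Int, 0 ≤ a → 0 ≤ b → 0 ≤ c → a + b + c = s →
      a * b * c ≤ q * (q + u) * (q + v)) :
    maxvolume s = q * (q + u) * (q + v) := by
  have hM0 : (0:Int) ≤ q * (q + u) * (q + v) :=
    mul_nonneg (mul_nonneg (by omega) (by omega)) (by omega)
  unfold maxvolume
  apply le_antisymm
  · refine pv_foldl_le _ _ _ 0 hM0 ?_
    intro m i hi hm
    refine pv_foldl_le _ _ _ m hm ?_
    intro m' j hj hm'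
    apply max_le hm'
    obtain ⟨hi0, hi1⟩ := (PySem.List.mem_pyRange_one).mp hi
    obtain ⟨hj0, hj1⟩ := (PySem.List.mem_pyRange_one).mp hj
    by_cases hk : 0 ≤ s - i - j
    · exact hbound i j (s - i - j) hi0 hj0 hk (by ring)
    · have hk' : s - i - j < 0 := by omega
      have : i * j * (s - i - j) ≤ 0 := by nlinarith [mul_nonneg hi0 hj0]
      exact this.trans hM0
  · refine pv_foldl_ge _ ?_ _ q (q * (q + u) * (q + v)) ?_ ?_ 0
    · intro m i
      exact (PySem.List.le_foldl_max_int (PySem.List.pyRange 0 s 1)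
        (fun j => i * j * (s - i - j)) m).1
    · intro m
      have hmem2 : q + u ∈ PySem.List.pyRange 0 s 1 :=
        (PySem.List.mem_pyRange_one).mpr ⟨by omega, by omega⟩
      have h := (PySem.List.le_foldl_max_int (PySem.List.pyRange 0 s 1)
        (fun j => q * j * (s - q - j)) m).2 (q + u) hmem2
      have harg : s - q - (q + u) = q + v := by omega
      simpa [harg] using h
    · exact (PySem.List.mem_pyRange_one).mpr ⟨by omega, by omega⟩

theorem pv_main (s : Int) : maxvolume s = maxvolume_alt s := by
  by_cases h3 : s < 3
  · by_cases h2 : s < 2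
    · have hnil : PySem.List.pyRange 0 (s - 1) 1 = [] := PySem.List.pyRange_one_eq_nil (by omega)
      simp [maxvolume, maxvolume_alt, hnil, if_pos h3]
    · have hs2 : s = 2 := by omega
      subst hs2; decide
  · have h3' : 3 ≤ s := by omega
    obtain ⟨q, r, hqr, hr0, hr2, hq1⟩ : ∃ q r : Int, s = 3 * q + r ∧ 0 ≤ r ∧ r < 3 ∧ 1 ≤ q :=
      ⟨s / 3, s % 3, by omega, by omega, by omega, by omega⟩
    have fd : ∀ t k : Int, k * 3 ≤ t → t < (k + 1) * 3 → PySem.Int.floordiv t 3 = k :=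
      fun t k h1 h2 => (PySem.Int.floordiv_eq_iff_of_pos (by norm_num)).mpr ⟨h1, h2⟩
    have hr012 : r = 0 ∨ r = 1 ∨ r = 2 := by omega
    have habc := pv_abc_le q r (by omega) hr012
    rcases hr012 with rfl | rfl | rfl
    · have halt : maxvolume_alt s = q * (q + 0) * (q + 0) := by
        simp only [maxvolume_alt, if_neg (show ¬ s < 3 by omega)]
        rw [fd s q (by omega) (by omega), fd (s + 1) q (by omega) (by omega),
          fd (s + 2) q (by omega) (by omega)]; ring
      rw [halt]
      refine pv_loop_eq s q 0 0 hq1 (by omega) le_rfl (by omega) le_rfl ?_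
      intro a b c ha hb hc hsum
      simpa [pvM] using habc _ a b c ha hb hc (by omega) rfl
    · have halt : maxvolume_alt s = q * (q + 0) * (q + 1) := by
        simp only [maxvolume_alt, if_neg (show ¬ s < 3 by omega)]
        rw [fd s q (by omega) (by omega), fd (s + 1) q (by omega) (by omega),
          fd (s + 2) (q + 1) (by omega) (by omega)]; ring
      rw [halt]
      refine pv_loop_eq s q 0 1 hq1 (by omega) le_rfl (by omega) (by omega) ?_
      intro a b c ha hb hc hsum
      simpa [pvM] using habc _ a b c ha hb hc (by omega) rfl
    · have halt : maxvolume_alt s = q * (q + 1) * (q + 1) := by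
        simp only [maxvolume_alt, if_neg (show ¬ s < 3 by omega)]
        rw [fd s q (by omega) (by omega), fd (s + 1) (q + 1) (by omega) (by omega),
          fd (s + 2) (q + 1) (by omega) (by omega)]
      rw [halt]
      refine pv_loop_eq s q 1 1 hq1 (by omega) (by omega) (by omega) le_rfl ?_
      intro a b c ha hb hc hsum
      simpa [pvM] using habc _ a b c ha hb hc (by omega) rfl

-- ===== VERDICT (by name: the statement is the Claim_ definition above) =====
theorem maxvolume_spec : Claim_equal_maxvolume := by
  intro s _
  unfold Spec_maxvolume
  exact pv_main s
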